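-- pv_equiv track=rewrite | github.com/rafarorr1/csm-database | convert_bsdata.py | parse_stat_block
-- ===== SOURCE A (Python) =====
-- def parse_stat_block(chars):
--     """
--     BSData Unit profiles use characteristic names like:
--     M, T, SV, W, LD, OC and sometimes INV/INV SV
--     """
--     stat_keys = {
--         "M": "M", "Move": "M",
--         "T": "T", "Toughness": "T",
--         "SV": "SV", "Save": "SV",
--         "W": "W", "Wounds": "W",
--         "LD": "LD", "Leadership": "LD",
--         "OC": "OC", "Objective Control": "OC",
--         "INV": "INV", "INV SV": "INV", "Invulnerable Save": "INV",
--     }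
--     stats = {}
--     for raw_key, norm_key in stat_keys.items():
--         if raw_key in chars and norm_key not in stats:
--             val = chars[raw_key]
--             if val and val not in ("-", "N/A", ""):
--                 stats[norm_key] = val
--     return stats
-- ===== SOURCE B (Python) =====
-- def parse_stat_block(chars):
--     """
--     BSData Unit profiles use characteristic names like:
--     M, T, SV, W, LD, OC and sometimes INV/INV SV
--     """
--     ALIAS = {
--         "M": ("M", 0), "Move": ("M", 1),
--         "T": ("T", 0), "Toughness": ("T", 1),
--         "SV": ("SV", 0), "Save": ("SV", 1),
--         "W": ("W", 0), "Wounds": ("W", 1),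
--         "LD": ("LD", 0), "Leadership": ("LD", 1),
--         "OC": ("OC", 0), "Objective Control": ("OC", 1),
--         "INV": ("INV", 0), "INV SV": ("INV", 1), "Invulnerable Save": ("INV", 2),
--     }
--     best = {}
--     for raw, val in chars.items():
--         hit = ALIAS.get(raw)
--         if hit is None:
--             continue
--         if not val or val in ("-", "N/A", ""):
--             continue
--         norm, rank = hit
--         cur = best.get(norm)
--         if cur is None or rank < cur[0]:
--             best[norm] = (rank, val)
--     return {k: best[k][1] for k in ("M", "T", "SV", "W", "LD", "OC", "INV") if k in best}
-- ===== Notes on version B (the rewrite author's own statement) =====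
-- stated objective: alternative
-- what changed: A loops over the 15-entry alias table doing membership lookups into chars; B instead makes one pass over chars itself, classifying each entry through an alias->(normalized key, priority rank) index and keeping the lowest-rank valid value per normalized key, then emits the kept values in canonical key order.
import Mathlib
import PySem

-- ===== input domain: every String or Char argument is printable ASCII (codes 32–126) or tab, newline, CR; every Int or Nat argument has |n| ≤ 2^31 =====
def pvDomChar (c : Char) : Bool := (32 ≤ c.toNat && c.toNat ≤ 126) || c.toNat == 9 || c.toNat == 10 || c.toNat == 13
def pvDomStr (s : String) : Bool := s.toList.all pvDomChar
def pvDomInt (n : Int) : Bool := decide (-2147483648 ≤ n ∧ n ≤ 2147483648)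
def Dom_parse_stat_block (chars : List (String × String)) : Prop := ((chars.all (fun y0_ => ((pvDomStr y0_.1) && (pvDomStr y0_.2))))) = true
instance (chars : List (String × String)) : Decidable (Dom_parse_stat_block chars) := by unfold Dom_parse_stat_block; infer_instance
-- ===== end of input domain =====

-- B replaces A's alias-table-driven loop (membership lookups into chars) by a single pass
-- over chars with an alias->(norm, rank) index and per-key minimal-rank selection: a different traversal, not faster.


-- ===== PORT A =====
-- the literal stat_keys dict of A, as its items list (insertion order)
def statKeysA : List (String × String) :=
  [("M","M"), ("Move","M"),
   ("T","T"), ("Toughness","T"),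
   ("SV","SV"), ("Save","SV"),
   ("W","W"), ("Wounds","W"),
   ("LD","LD"), ("Leadership","LD"),
   ("OC","OC"), ("Objective Control","OC"),
   ("INV","INV"), ("INV SV","INV"), ("Invulnerable Save","INV")]

-- 'val and val not in ("-", "N/A", "")'
def validA (v : String) : Bool := v != "" && v != "-" && v != "N/A"

-- the body of A's for-loop over stat_keys.items()
def stepA (chars : List (String × String)) (stats : PySem.Dict String String)
    (p : String × String) : PySem.Dict String String :=
  match chars.find? (fun q => q.1 == p.1) with   -- 'raw_key in chars' / 'chars[raw_key]' (assoc-list first match)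
  | some q =>
      if stats.contains p.2 then stats
      else if validA q.2 then stats.insert p.2 q.2 else stats
  | none => stats

def parse_stat_block (chars : List (String × String)) : List (String × String) :=
  (statKeysA.foldl (stepA chars) PySem.Dict.empty).items

-- ===== PORT B =====
-- B's ALIAS dict: raw key -> (normalized key, priority rank)
def aliasTbl : PySem.Dict String (String × Int) :=
  PySem.Dict.ofList
    [("M",("M",0)), ("Move",("M",1)),
     ("T",("T",0)), ("Toughness",("T",1)),
     ("SV",("SV",0)), ("Save",("SV",1)),
     ("W",("W",0)), ("Wounds",("W",1)),
     ("LD",("LD",0)), ("Leadership",("LD",1)),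
     ("OC",("OC",0)), ("Objective Control",("OC",1)),
     ("INV",("INV",0)), ("INV SV",("INV",1)), ("Invulnerable Save",("INV",2))]

-- 'not val or val in ("-", "N/A", "")' negated
def validB (v : String) : Bool := v != "" && v != "-" && v != "N/A"

-- body of B's loop over chars.items()
def stepB (best : PySem.Dict String (Int × String)) (p : String × String) :
    PySem.Dict String (Int × String) :=
  match aliasTbl.get? p.1 with
  | none => best
  | some hit =>
      if validB p.2 then
        match best.get? hit.1 with
        | none => best.insert hit.1 (hit.2, p.2)
        | some cur => if hit.2 < cur.1 then best.insert hit.1 (hit.2, p.2) else best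
      else best

def parse_stat_block_alt (chars : List (String × String)) : List (String × String) :=
  let best := chars.foldl stepB PySem.Dict.empty
  ["M", "T", "SV", "W", "LD", "OC", "INV"].filterMap
    (fun k => (best.get? k).map (fun c => (k, c.2)))

-- ===== PRECONDITION & SPEC =====
-- chars encodes a Python dict[str, str]; an association list with duplicate keys encodes no
-- dict input at all, so Pre_ restricts the claim to lists with pairwise-distinct keys.
def Pre_parse_stat_block (chars : List (String × String)) : Prop :=
  (chars.map Prod.fst).Nodup
instance (chars : List (String × String)) : Decidable (Pre_parse_stat_block chars) := by
  unfold Pre_parse_stat_block; infer_instance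

def pvWitness_parse_stat_block : (List (String × String)) :=
  [("M", "6"), ("W", "-"), ("Toughness", "4"), ("Zeal", "9")]

def Spec_parse_stat_block (chars : List (String × String)) (out : List (String × String)) : Prop := out = parse_stat_block_alt chars
instance (chars : List (String × String)) (out : List (String × String)) : Decidable (Spec_parse_stat_block chars out) := by unfold Spec_parse_stat_block; infer_instance

-- ===== CLAIM (what is proved, stated in full; the proofs are below) =====
def Claim_equal_parse_stat_block : Prop := ∀ (chars : List (String × String)), Dom_parse_stat_block chars → Pre_parse_stat_block chars → Spec_parse_stat_block chars (parse_stat_block chars)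

-- ===== LEMMAS AND PROOFS =====

-- ---- common intermediate form: per normalized key, the first valid candidate ----
def groupsB : List (String × List String) :=
  [("M", ["M", "Move"]),
   ("T", ["T", "Toughness"]),
   ("SV", ["SV", "Save"]),
   ("W", ["W", "Wounds"]),
   ("LD", ["LD", "Leadership"]),
   ("OC", ["OC", "Objective Control"]),
   ("INV", ["INV", "INV SV", "Invulnerable Save"])]

def firstValid (chars : List (String × String)) : List String → Option String
  | [] => none
  | c :: rest =>
      match chars.find? (fun q => q.1 == c) with
      | some q => if validB q.2 then some q.2 else firstValid chars rest
      | none => firstValid chars rest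

def specF (chars : List (String × String)) : List (String × String) :=
  groupsB.filterMap (fun g => (firstValid chars g.2).map (fun v => (g.1, v)))

-- ---- A-side: A computes specF ----
theorem foldl_stepA_skip (chars : List (String × String)) (norm : String)
    (cands : List String) (stats : PySem.Dict String String)
    (h : stats.contains norm = true) :
    (cands.map (fun c => (c, norm))).foldl (stepA chars) stats = stats := by
  induction cands with
  | nil => rfl
  | cons c rest ih =>
      simp only [List.map, List.foldl]
      have : stepA chars stats (c, norm) = stats := by
        unfold stepA
        cases chars.find? (fun q => q.1 == c) with
        | none => rfl
        | some q => simp [h]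
      rw [this, ih]

theorem foldl_stepA_group (chars : List (String × String)) (norm : String)
    (cands : List String) (stats : PySem.Dict String String)
    (h : stats.contains norm = false) :
    (cands.map (fun c => (c, norm))).foldl (stepA chars) stats =
      match firstValid chars cands with
      | some v => stats.insert norm v
      | none => stats := by
  induction cands generalizing stats with
  | nil => rfl
  | cons c rest ih =>
      simp only [List.map, List.foldl, firstValid]
      cases hf : chars.find? (fun q => q.1 == c) with
      | none =>
          simp only [stepA, hf]
          exact ih stats h
      | some q =>
          simp only [stepA, hf, h, if_false, Bool.false_eq_true]
          by_cases hv : validB q.2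
          · simp only [validA, validB] at *
            simp only [hv, if_true]
            rw [foldl_stepA_skip chars norm rest _
                (PySem.Dict.contains_insert_self stats norm q.2)]
          · simp only [validA, validB] at *
            simp only [hv, if_false, Bool.false_eq_true]
            exact ih stats h

theorem foldl_stepA_groups (chars : List (String × String))
    (gs : List (String × List String)) (stats : PySem.Dict String String)
    (hnd : stats.keys.Nodup) (hgs : (gs.map Prod.fst).Nodup)
    (hfresh : ∀ g ∈ gs, stats.contains g.1 = false) :
    ((gs.flatMap (fun g => g.2.map (fun c => (c, g.1)))).foldl (stepA chars) stats).items =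
      stats.items ++ gs.filterMap (fun g => (firstValid chars g.2).map (fun v => (g.1, v))) := by
  induction gs generalizing stats with
  | nil => simp
  | cons g rest ih =>
      simp only [List.flatMap_cons, List.foldl_append, List.filterMap_cons]
      have hg : stats.contains g.1 = false := hfresh g (by simp)
      rw [foldl_stepA_group chars g.1 g.2 stats hg]
      cases hfv : firstValid chars g.2 with
      | none =>
          simp only [Option.map_none]
          exact ih stats hnd (List.Nodup.of_cons hgs) (fun g' hg' => hfresh g' (by simp [hg']))
      | some v =>
          simp only [Option.map_some]
          have hne : ∀ g' ∈ rest, g'.1 ≠ g.1 := by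
            intro g' hg'
            have := (List.nodup_cons.mp hgs).1
            intro he; exact this (he ▸ List.mem_map_of_mem hg')
          rw [ih (stats.insert g.1 v)
                (PySem.Dict.nodup_keys_insert stats g.1 v hnd)
                (List.Nodup.of_cons hgs)
                (fun g' hg' => by
                  rw [PySem.Dict.contains_insert]
                  simp [hne g' hg', hfresh g' (List.mem_cons_of_mem _ hg')])]
          rw [PySem.Dict.items_insert_of_not_contains stats v hg]
          simp

theorem parse_stat_block_eq_specF (chars : List (String × String)) :
    parse_stat_block chars = specF chars := by
  unfold parse_stat_block specF
  have hflat : statKeysA = groupsB.flatMap (fun g => g.2.map (fun c => (c, g.1))) := by rfl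
  rw [hflat, foldl_stepA_groups chars groupsB PySem.Dict.empty (by decide) (by decide)
    (fun g _ => by simp [PySem.Dict.contains_empty])]
  rfl

-- ---- B-side machinery ----
-- the projection of stepB onto a single normalized key
def selStep (norm : String) (acc : Option (Int × String)) (p : String × String) :
    Option (Int × String) :=
  match aliasTbl.get? p.1 with
  | none => acc
  | some hit =>
      if validB p.2 then
        if hit.1 == norm then
          match acc with
          | none => some (hit.2, p.2)
          | some cur => if hit.2 < cur.1 then some (hit.2, p.2) else acc
        else acc
      else acc

theorem get?_stepB (best : PySem.Dict String (Int × String)) (p : String × String)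
    (norm : String) : (stepB best p).get? norm = selStep norm (best.get? norm) p := by
  unfold stepB selStep
  cases aliasTbl.get? p.1 with
  | none => rfl
  | some hit =>
      by_cases hv : validB p.2
      · simp only [hv, if_true]
        by_cases he : hit.1 = norm
        · subst he
          simp only [beq_self_eq_true, if_true]
          cases hb : best.get? hit.1 with
          | none => simp [PySem.Dict.get?_insert_self]
          | some cur =>
              by_cases hlt : hit.2 < cur.1
              · simp [hlt, PySem.Dict.get?_insert_self]
              · simp [hlt, hb]
        · have hne : (hit.1 == norm) = false := by simp [he]
          simp only [hne, Bool.false_eq_true, if_false]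
          cases hb : best.get? hit.1 with
          | none => rw [PySem.Dict.get?_insert_of_ne _ _ (fun h => he h.symm)]
          | some cur =>
              by_cases hlt : hit.2 < cur.1
              · simp only [hlt, if_true]
                rw [PySem.Dict.get?_insert_of_ne _ _ (fun h => he h.symm)]
              · simp [hlt]
      · simp [hv]

theorem get?_foldl_stepB (chars : List (String × String))
    (best : PySem.Dict String (Int × String)) (norm : String) :
    (chars.foldl stepB best).get? norm = chars.foldl (selStep norm) (best.get? norm) := by
  induction chars generalizing best with
  | nil => rfl
  | cons p rest ih => simp only [List.foldl]; rw [ih, get?_stepB]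

-- left-biased minimum by rank
def chooseMin (a b : Option (Int × String)) : Option (Int × String) :=
  match a, b with
  | none, b => b
  | some x, none => some x
  | some x, some y => if y.1 < x.1 then some y else some x

theorem chooseMin_none_right (a : Option (Int × String)) : chooseMin a none = a := by
  cases a <;> rfl

theorem chooseMin_assoc (a b c : Option (Int × String)) :
    chooseMin (chooseMin a b) c = chooseMin a (chooseMin b c) := by
  cases a with
  | none => rfl
  | some x =>
    cases b with
    | none => rfl
    | some y =>
      cases c with
      | none => simp only [chooseMin]; split_ifs <;> rfl
      | some z =>
        by_cases h1 : y.1 < x.1 <;> by_cases h2 : z.1 < y.1 <;> by_cases h3 : z.1 < x.1 <;>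
          simp only [chooseMin, h1, h2, h3, if_true, if_false] <;>
          first | rfl | (exfalso; omega)

theorem selStep_eq_chooseMin (norm : String) (acc : Option (Int × String))
    (p : String × String) : selStep norm acc p = chooseMin acc (selStep norm none p) := by
  unfold selStep
  cases aliasTbl.get? p.1 with
  | none => exact (chooseMin_none_right acc).symm
  | some hit =>
      by_cases hv : validB p.2
      · simp only [hv, if_true]
        by_cases he : (hit.1 == norm) = true
        · simp only [he, if_true]
          cases acc with
          | none => rfl
          | some cur => by_cases hlt : hit.2 < cur.1 <;> simp [chooseMin, hlt]
        · simp only [he, Bool.false_eq_true, if_false]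
          exact (chooseMin_none_right acc).symm
      · simp only [hv, Bool.false_eq_true, if_false]
        exact (chooseMin_none_right acc).symm

theorem foldl_selStep_acc (norm : String) (chars : List (String × String))
    (acc : Option (Int × String)) :
    chars.foldl (selStep norm) acc = chooseMin acc (chars.foldl (selStep norm) none) := by
  induction chars generalizing acc with
  | nil => exact (chooseMin_none_right acc).symm
  | cons p rest ih =>
      simp only [List.foldl]
      rw [ih (selStep norm acc p), ih (selStep norm none p),
          selStep_eq_chooseMin norm acc p, chooseMin_assoc]

-- the candidate chain: ranks made explicit
def gopt (chars : List (String × String)) (r : Int) (c : String) : Option (Int × String) :=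
  match chars.find? (fun q => q.1 == c) with
  | some q => if validB q.2 then some (r, q.2) else none
  | none => none

def chain (chars : List (String × String)) : List (Int × String) → Option (Int × String)
  | [] => none
  | rc :: rest => (gopt chars rc.1 rc.2).or (chain chars rest)

theorem chain_nil (cands : List (Int × String)) : chain [] cands = none := by
  induction cands with
  | nil => rfl
  | cons rc rest ih => simp [chain, gopt, ih]

theorem chain_skip (p : String × String) (rest : List (String × String))
    (cands : List (Int × String)) (h : ∀ rc ∈ cands, rc.2 ≠ p.1) :
    chain (p :: rest) cands = chain rest cands := by
  induction cands with
  | nil => rfl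
  | cons rc crest ih =>
      simp only [chain]
      have hk : (p.1 == rc.2) = false := by
        have := h rc (by simp)
        simp [Ne.symm this]
      rw [ih (fun rc' h' => h rc' (by simp [h']))]
      unfold gopt
      simp [List.find?, hk]

theorem chain_rank_mem (chars : List (String × String)) (cands : List (Int × String))
    (x : Int × String) (h : chain chars cands = some x) : ∃ rc ∈ cands, rc.1 = x.1 := by
  induction cands with
  | nil => simp [chain] at h
  | cons rc rest ih =>
      simp only [chain] at h
      cases hg : gopt chars rc.1 rc.2 with
      | some y =>
          rw [hg] at h
          simp only [Option.or] at h
          refine ⟨rc, by simp, ?_⟩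
          unfold gopt at hg
          cases hf : chars.find? (fun q => q.1 == rc.2) with
          | none => simp [hf] at hg
          | some q =>
              rw [hf] at hg
              by_cases hv : validB q.2
              · simp only [hv, if_true, Option.some_inj] at hg
                cases h; cases hg; rfl
              · simp [hv] at hg
      | none =>
          rw [hg] at h
          simp only [Option.or] at h
          obtain ⟨rc', hm, he⟩ := ih h
          exact ⟨rc', by simp [hm], he⟩

-- one step of chars against the whole chain of one group
theorem chain_cons (p : String × String) (rest : List (String × String))
    (norm : String) (cands : List (Int × String))
    (hA : ∀ r', aliasTbl.get? p.1 = some (norm, r') → (r', p.1) ∈ cands)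
    (hB : ∀ rc ∈ cands, aliasTbl.get? rc.2 = some (norm, rc.1))
    (hR : cands.Pairwise (fun a b => a.1 < b.1))
    (hK : (cands.map Prod.snd).Nodup)
    (hfresh : ∀ q ∈ rest, q.1 ≠ p.1) :
    chain (p :: rest) cands = chooseMin (selStep norm none p) (chain rest cands) := by
  induction cands with
  | nil =>
      simp only [chain]
      unfold selStep
      cases ha : aliasTbl.get? p.1 with
      | none => rfl
      | some hit =>
          by_cases hv : validB p.2
          · simp only [hv, if_true]
            by_cases he : (hit.1 == norm) = true
            · exfalso
              have hh : hit = (norm, hit.2) := by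
                cases hit; simp at he ⊢; exact he
              exact absurd (hA hit.2 (by rw [ha, hh])) (by simp)
            · simp [he, chooseMin]
          · simp [hv, chooseMin]
  | cons rc crest ih =>
      simp only [chain]
      by_cases hpc : p.1 = rc.2
      · -- p is this candidate
        have hget : aliasTbl.get? p.1 = some (norm, rc.1) := by rw [hpc]; exact hB rc (by simp)
        have hgp : gopt (p :: rest) rc.1 rc.2 = (if validB p.2 then some (rc.1, p.2) else none) := by
          unfold gopt
          simp [List.find?, hpc.symm]
        have hgr : gopt rest rc.1 rc.2 = none := by
          unfold gopt
          cases hf : rest.find? (fun q => q.1 == rc.2) with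
          | none => rfl
          | some q =>
              exfalso
              have hq := List.find?_some hf
              have hqm := List.mem_of_find?_eq_some hf
              have : q.1 = rc.2 := by simpa using hq
              exact hfresh q hqm (by rw [this, hpc])
        have hskip : chain (p :: rest) crest = chain rest crest := by
          apply chain_skip
          intro rc' h' he
          have hh := hK
          rw [List.map_cons, List.nodup_cons] at hh
          apply hh.1
          have hm := List.mem_map_of_mem (f := Prod.snd) h'
          rw [he, hpc] at hm
          exact hm
        have hsel : selStep norm none p = (if validB p.2 then some (rc.1, p.2) else none) := by
          unfold selStep
          rw [hget]
          by_cases hv : validB p.2 <;> simp [hv]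
        rw [hgp, hgr, hskip, hsel]
        by_cases hv : validB p.2
        · simp only [hv, if_true, Option.or]
          cases hc : chain rest crest with
          | none => simp [chooseMin]
          | some x =>
              obtain ⟨rc', hm, he⟩ := chain_rank_mem rest crest x hc
              have hlt : rc.1 < rc'.1 := (List.pairwise_cons.mp hR).1 rc' hm
              simp only [chooseMin]
              rw [if_neg (by omega : ¬ x.1 < rc.1)]
        · simp [hv, chooseMin]
      · -- p is not this candidate
        have hgp : gopt (p :: rest) rc.1 rc.2 = gopt rest rc.1 rc.2 := by
          unfold gopt
          simp [List.find?, (by simp [hpc] : (p.1 == rc.2) = false)]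
        have ihm : chain (p :: rest) crest = chooseMin (selStep norm none p) (chain rest crest) := by
          apply ih
          · intro r' h'
            have := hA r' h'
            rcases List.mem_cons.mp this with he | hm
            · exfalso; apply hpc; rw [← (congrArg Prod.snd he)]
            · exact hm
          · exact fun rc' h' => hB rc' (by simp [h'])
          · exact (List.pairwise_cons.mp hR).2
          · exact (List.nodup_cons.mp hK).2
        rw [hgp, ihm]
        cases hg : gopt rest rc.1 rc.2 with
        | none => simp [Option.or]
        | some y =>
            have hy : y.1 = rc.1 := by
              unfold gopt at hg
              cases hf : rest.find? (fun q => q.1 == rc.2) with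
              | none => simp [hf] at hg
              | some q =>
                  rw [hf] at hg
                  by_cases hv : validB q.2
                  · simp only [hv, if_true, Option.some_inj] at hg; rw [← hg]
                  · simp [hv] at hg
            simp only [Option.or]
            -- RHS: chooseMin S (some y <|> chain rest crest) with S rank > rc.1 if present
            cases hs : selStep norm none p with
            | none => simp [chooseMin]
            | some s =>
                have hsr : rc.1 < s.1 := by
                  unfold selStep at hs
                  cases ha : aliasTbl.get? p.1 with
                  | none => simp [ha] at hs
                  | some hit =>
                      rw [ha] at hs
                      by_cases hv : validB p.2
                      · simp only [hv, if_true] at hs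
                        by_cases he : (hit.1 == norm) = true
                        · simp only [he, if_true, Option.some_inj] at hs
                          have hh : hit = (norm, hit.2) := by
                            cases hit; simp at he ⊢; exact he
                          have hmem := hA hit.2 (by rw [ha, hh])
                          rcases List.mem_cons.mp hmem with hee | hm
                          · exfalso; apply hpc; rw [← (congrArg Prod.snd hee)]
                          · have := (List.pairwise_cons.mp hR).1 _ hm
                            rw [← hs]; simpa using this
                        · simp [he] at hs
                      · simp [hv] at hs
                simp only [chooseMin]
                rw [if_pos (by omega : y.1 < s.1)]

theorem foldl_selStep_eq_chain (norm : String) (cands : List (Int × String))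
    (hB : ∀ rc ∈ cands, aliasTbl.get? rc.2 = some (norm, rc.1))
    (hR : cands.Pairwise (fun a b => a.1 < b.1))
    (hK : (cands.map Prod.snd).Nodup)
    (hA : ∀ s r', aliasTbl.get? s = some (norm, r') → (r', s) ∈ cands) :
    ∀ chars : List (String × String), (chars.map Prod.fst).Nodup →
      chars.foldl (selStep norm) none = chain chars cands := by
  intro chars
  induction chars with
  | nil => intro _; rw [chain_nil]; rfl
  | cons p rest ih =>
      intro hnd
      rw [List.map_cons, List.nodup_cons] at hnd
      simp only [List.foldl]
      rw [foldl_selStep_acc, ih hnd.2]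
      rw [chain_cons p rest norm cands (fun r' h => hA p.1 r' h) hB hR hK
        (fun q hq he => hnd.1 (he ▸ List.mem_map_of_mem (f := Prod.fst) hq))]

-- chain projects to firstValid
theorem chain_map_snd (chars : List (String × String)) (cands : List (Int × String)) :
    (chain chars cands).map Prod.snd = firstValid chars (cands.map Prod.snd) := by
  induction cands with
  | nil => rfl
  | cons rc rest ih =>
      simp only [chain, List.map, firstValid]
      unfold gopt
      cases hf : chars.find? (fun q => q.1 == rc.2) with
      | none => simpa using ih
      | some q =>
          by_cases hv : validB q.2
          · simp [hv, Option.or]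
          · simpa [hv] using ih

-- the 15 alias entries, and the candidate chain of each normalized key
def aliasL : List (String × (String × Int)) :=
  [("M",("M",0)), ("Move",("M",1)),
   ("T",("T",0)), ("Toughness",("T",1)),
   ("SV",("SV",0)), ("Save",("SV",1)),
   ("W",("W",0)), ("Wounds",("W",1)),
   ("LD",("LD",0)), ("Leadership",("LD",1)),
   ("OC",("OC",0)), ("Objective Control",("OC",1)),
   ("INV",("INV",0)), ("INV SV",("INV",1)), ("Invulnerable Save",("INV",2))]

def candsOf : String → List (Int × String)
  | "M" => [(0, "M"), (1, "Move")]
  | "T" => [(0, "T"), (1, "Toughness")]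
  | "SV" => [(0, "SV"), (1, "Save")]
  | "W" => [(0, "W"), (1, "Wounds")]
  | "LD" => [(0, "LD"), (1, "Leadership")]
  | "OC" => [(0, "OC"), (1, "Objective Control")]
  | "INV" => [(0, "INV"), (1, "INV SV"), (2, "Invulnerable Save")]
  | _ => []

set_option maxHeartbeats 1000000 in
theorem alias_mem (s : String) (x : String × Int) (h : aliasTbl.get? s = some x) :
    (s, x) ∈ aliasL := by
  have hi : aliasTbl.items = aliasL := by decide
  have := PySem.Dict.mem_items_of_get?_eq_some aliasTbl h
  rwa [hi] at this

set_option maxHeartbeats 1000000 in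
theorem alias_complete (s : String) (x : String × Int) (h : aliasTbl.get? s = some x) :
    (x.2, s) ∈ candsOf x.1 := by
  have hm := alias_mem s x h
  simp only [aliasL, List.mem_cons, List.not_mem_nil, or_false] at hm
  rcases hm with h'|h'|h'|h'|h'|h'|h'|h'|h'|h'|h'|h'|h'|h'|h' <;>
    (injection h' with h1 h2; subst h1; subst h2; decide)

-- ===== assembly =====
theorem group_eval (chars : List (String × String)) (hnd : (chars.map Prod.fst).Nodup)
    (norm : String)
    (hB : ∀ rc ∈ candsOf norm, aliasTbl.get? rc.2 = some (norm, rc.1))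
    (hR : (candsOf norm).Pairwise (fun a b => a.1 < b.1))
    (hK : ((candsOf norm).map Prod.snd).Nodup) :
    ((chars.foldl stepB PySem.Dict.empty).get? norm).map (fun c => (norm, c.2)) =
      (firstValid chars ((candsOf norm).map Prod.snd)).map (fun v => (norm, v)) := by
  have hA : ∀ s r', aliasTbl.get? s = some (norm, r') → (r', s) ∈ candsOf norm :=
    fun s r' h => alias_complete s (norm, r') h
  rw [get?_foldl_stepB, PySem.Dict.get?_empty,
      foldl_selStep_eq_chain norm (candsOf norm) hB hR hK hA chars hnd,
      ← chain_map_snd]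
  cases chain chars (candsOf norm) <;> rfl

theorem parse_stat_block_alt_eq_specF (chars : List (String × String))
    (hnd : (chars.map Prod.fst).Nodup) : parse_stat_block_alt chars = specF chars := by
  unfold parse_stat_block_alt specF
  have h7 := fun norm => group_eval chars hnd norm
  have hM := h7 "M" (by decide) (by decide) (by decide)
  have hT := h7 "T" (by decide) (by decide) (by decide)
  have hSV := h7 "SV" (by decide) (by decide) (by decide)
  have hW := h7 "W" (by decide) (by decide) (by decide)
  have hLD := h7 "LD" (by decide) (by decide) (by decide)
  have hOC := h7 "OC" (by decide) (by decide) (by decide)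
  have hINV := h7 "INV" (by decide) (by decide) (by decide)
  simp only [candsOf, List.map_cons, List.map_nil] at hM hT hSV hW hLD hOC hINV
  simp only [groupsB, List.filterMap_cons, List.filterMap_nil]
  rw [hM, hT, hSV, hW, hLD, hOC, hINV]

-- ===== VERDICT (by name: the statement is the Claim_ definition above) =====
theorem parse_stat_block_spec : Claim_equal_parse_stat_block := by
  intro chars _ hpre
  unfold Spec_parse_stat_block
  rw [parse_stat_block_eq_specF, parse_stat_block_alt_eq_specF chars hpre]
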